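-- pv_equiv track=rewrite | github.com/danielm2402/poda_alfa_beta | Go.py | checkLibertadArriba
-- ===== SOURCE A (Python) =====
-- def checkLibertadArriba(index, board, player):
--     if index - 9 >= 0:
--         if board[index - 9] != 0:
--             if board[index - 9] == player:
--                 n = (index - 9) - 9
--                 while n > 0:
--                     if board[n] != player:
--                         return False
--                     elif board[n] == 0:
--                         return True
--                     n = n - 9
--             return False
--         else:
--             return True
--     return False
-- ===== SOURCE B (Python) =====
-- def checkLibertadArriba(index, board, player):
--     # The inner while loop of A can never return True (its `elif board[n] == 0`
--     # branch is unreachable), so the function is true exactly when the square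
--     # directly above exists and is empty.
--     return index - 9 >= 0 and board[index - 9] == 0
-- ===== Notes on version B (the rewrite author's own statement) =====
-- stated objective: simpler
-- what changed: Replaced the nested conditionals and the dead while loop (which can never return True) by a single short-circuit boolean expression: the square above exists and is empty.
import Mathlib
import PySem

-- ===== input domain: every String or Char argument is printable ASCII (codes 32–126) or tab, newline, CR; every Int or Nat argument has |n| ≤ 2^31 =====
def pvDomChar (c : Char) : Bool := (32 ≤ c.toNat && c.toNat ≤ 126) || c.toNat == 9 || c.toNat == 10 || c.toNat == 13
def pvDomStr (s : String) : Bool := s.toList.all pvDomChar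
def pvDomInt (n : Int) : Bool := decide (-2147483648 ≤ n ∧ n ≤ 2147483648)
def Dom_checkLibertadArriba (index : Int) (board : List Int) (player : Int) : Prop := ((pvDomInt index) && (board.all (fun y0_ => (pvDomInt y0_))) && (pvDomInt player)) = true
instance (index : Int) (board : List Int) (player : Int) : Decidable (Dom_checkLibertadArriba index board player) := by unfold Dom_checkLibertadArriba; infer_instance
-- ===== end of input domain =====

-- B replaces A's nested conditionals and dead while loop by one short-circuit
-- boolean expression (simpler); return values agree on all inputs where A returns.

-- ===== PORT A =====
-- the `while n > 0:` loop of A (falling out of the loop is `return False` after it)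
def checkLibertadArribaLoop (board : List Int) (player : Int) (n : Int) : Bool :=
  if h : n > 0 then
    match PySem.List.pyGet? board n with
    | none => false   -- IndexError; unreachable under Pre_ (n < index - 9 < board.length)
    | some v =>
      if v ≠ player then false
      else if v = 0 then true
      else checkLibertadArribaLoop board player (n - 9)
  else false
termination_by n.toNat
decreasing_by omega

def checkLibertadArriba (index : Int) (board : List Int) (player : Int) : Bool :=
  if index - 9 ≥ 0 then
    match PySem.List.pyGet? board (index - 9) with
    | none => false   -- IndexError in Python; excluded by Pre_
    | some v =>
      if v ≠ 0 then
        if v = player then checkLibertadArribaLoop board player ((index - 9) - 9)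
        else false
      else true
  else false

-- ===== PORT B =====
def checkLibertadArriba_alt (index : Int) (board : List Int) (player : Int) : Bool :=
  if index - 9 ≥ 0 then
    match PySem.List.pyGet? board (index - 9) with
    | none => false   -- IndexError in Python; excluded by Pre_
    | some v => v == 0
  else false

-- ===== PRECONDITION & SPEC =====
-- Pre_ excludes exactly the inputs where Python A raises IndexError (index - 9 ≥ len(board)).
def Pre_checkLibertadArriba (index : Int) (board : List Int) (player : Int) : Prop :=
  index - 9 ≥ 0 → index - 9 < (board.length : Int)
instance (index : Int) (board : List Int) (player : Int) : Decidable (Pre_checkLibertadArriba index board player) := by unfold Pre_checkLibertadArriba; infer_instance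
def pvWitness_checkLibertadArriba : Int × List Int × Int := (9, [1, 0], 1)

def Spec_checkLibertadArriba (index : Int) (board : List Int) (player : Int) (out : Bool) : Prop := out = checkLibertadArriba_alt index board player
instance (index : Int) (board : List Int) (player : Int) (out : Bool) : Decidable (Spec_checkLibertadArriba index board player out) := by unfold Spec_checkLibertadArriba; infer_instance

-- ===== CLAIM (what is proved, stated in full; the proofs are below) =====
def Claim_equal_checkLibertadArriba : Prop := ∀ (index : Int) (board : List Int) (player : Int), Dom_checkLibertadArriba index board player → Pre_checkLibertadArriba index board player → Spec_checkLibertadArriba index board player (checkLibertadArriba index board player)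

-- ===== LEMMAS AND PROOFS =====

-- A's loop can only return True when board[n] = player = 0; with player ≠ 0 it always returns False.
theorem checkLibertadArribaLoop_false (board : List Int) (player : Int) (hp : player ≠ 0) :
    ∀ n : Int, checkLibertadArribaLoop board player n = false := by
  intro n
  induction hn : n.toNat using Nat.strong_induction_on generalizing n with
  | _ k ih =>
    unfold checkLibertadArribaLoop
    split
    · rename_i h
      cases PySem.List.pyGet? board n with
      | none => rfl
      | some v =>
        simp only
        split
        · rfl
        · rename_i hv
          push_neg at hv
          rw [if_neg (by omega : ¬ v = 0)]
          subst hn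
          exact ih (n - 9).toNat (by omega) (n - 9) rfl
    · rfl

-- ===== VERDICT (by name: the statement is the Claim_ definition above) =====
theorem checkLibertadArriba_spec : Claim_equal_checkLibertadArriba := by
  intro index board player _ hpre
  unfold Spec_checkLibertadArriba checkLibertadArriba checkLibertadArriba_alt
  split
  · rename_i hge
    cases hg : PySem.List.pyGet? board (index - 9) with
    | none => rfl
    | some v =>
      simp only
      by_cases hv : v = 0
      · simp [hv]
      · rw [if_pos hv]
        by_cases hvp : v = player
        · rw [if_pos hvp]
          rw [checkLibertadArribaLoop_false board player (hvp ▸ hv)]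
          simp [hv]
        · rw [if_neg hvp]
          simp [hv]
  · rfl
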